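-- pv_equiv track=rewrite | github.com/codezart/combinatorialalgorithms | main_2D.py | string_to_2d_list
-- ===== SOURCE A (Python) =====
-- def string_to_2d_list(string, rows, cols):
-- 	if rows * cols != len(string):
-- 		raise ValueError("Size of the string does not match the given size of 2D list")
-- 	lst = [[0] * cols for _ in range(rows)]
-- 	for i in range(rows):
-- 		for j in range(cols):
-- 			lst[i][j] = int(string[i * cols + j])
-- 	return lst
-- ===== SOURCE B (Python) =====
-- def string_to_2d_list(string, rows, cols):
-- 	if rows * cols != len(string):
-- 		raise ValueError("Size of the string does not match the given size of 2D list")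
-- 	flat = [int(c) for c in string]
-- 	return [flat[i * cols:(i + 1) * cols] for i in range(rows)]
-- ===== Notes on version B (the rewrite author's own statement) =====
-- stated objective: simpler
-- what changed: A pre-allocates a zero matrix and fills cell (i,j) with interleaved index-arithmetic in a nested loop; B parses the string once into a flat list of ints and then reshapes it by slicing into rows.
-- outside the precondition, e.g. on string_to_2d_list('x', -1, -1): A returns [], B raises ValueError
import Mathlib
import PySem

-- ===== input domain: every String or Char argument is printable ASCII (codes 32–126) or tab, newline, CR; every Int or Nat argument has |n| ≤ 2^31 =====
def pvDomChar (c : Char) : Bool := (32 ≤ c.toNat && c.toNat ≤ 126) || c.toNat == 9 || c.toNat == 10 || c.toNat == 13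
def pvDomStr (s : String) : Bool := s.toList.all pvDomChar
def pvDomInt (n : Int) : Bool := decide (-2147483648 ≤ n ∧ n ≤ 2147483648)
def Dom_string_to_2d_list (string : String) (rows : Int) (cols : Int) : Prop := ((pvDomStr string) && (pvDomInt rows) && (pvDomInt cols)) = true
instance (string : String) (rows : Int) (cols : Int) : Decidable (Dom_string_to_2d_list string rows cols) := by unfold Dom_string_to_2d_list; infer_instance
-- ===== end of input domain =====

-- B parses the string once into a flat list of ints and reshapes it into rows by slicing, instead of
-- A's interleaved index-arithmetic fill of a pre-allocated zero matrix (objective: simpler).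

-- ===== PORT A =====
-- int(c) for a one-character lookup result (total form; the default 0 is never hit under Pre_)
def pvIntOfChar (oc : Option Char) : Int := (oc.bind (fun c => PySem.Int.ofChars? [c])).getD 0

def string_to_2d_list (string : String) (rows : Int) (cols : Int) : List (List Int) :=
  if rows * cols ≠ PySem.Str.len string then []  -- Python: raise ValueError — excluded by Pre_
  else
    let lst : List (List Int) :=
      (PySem.List.pyRange 0 rows 1).map (fun _ => PySem.List.pyRepeat [(0 : Int)] cols)
    (PySem.List.pyRange 0 rows 1).foldl (fun lst i =>
      (PySem.List.pyRange 0 cols 1).foldl (fun lst j =>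
        PySem.List.pySetD lst i
          (PySem.List.pySetD (PySem.List.pyGetD lst i []) j
            (pvIntOfChar (PySem.Str.pyGet? string (i * cols + j))))) lst) lst

-- ===== PORT B =====
def string_to_2d_list_alt (string : String) (rows : Int) (cols : Int) : List (List Int) :=
  if rows * cols ≠ PySem.Str.len string then []  -- Python: raise ValueError — excluded by Pre_
  else
    let flat : List Int := string.toList.map (fun c => pvIntOfChar (some c))
    (PySem.List.pyRange 0 rows 1).map (fun i =>
      PySem.List.slice flat (some (i * cols)) (some ((i + 1) * cols)))

-- ===== PRECONDITION & SPEC =====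
-- Pre_ excludes exactly the raising inputs: a size mismatch (both raise ValueError) and strings with a
-- non-digit character (A raises on every such string it indexes; in the degenerate negative-dimension
-- case A returns [] without parsing while B's flat parse raises ValueError).
def Pre_string_to_2d_list (string : String) (rows : Int) (cols : Int) : Prop :=
  rows * cols = PySem.Str.len string ∧ string.toList.all (fun c => decide ('0' ≤ c ∧ c ≤ '9')) = true

instance (string : String) (rows : Int) (cols : Int) : Decidable (Pre_string_to_2d_list string rows cols) := by
  unfold Pre_string_to_2d_list; infer_instance

def pvWitness_string_to_2d_list : String × Int × Int := ("1234", 2, 2)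

def Spec_string_to_2d_list (string : String) (rows : Int) (cols : Int) (out : List (List Int)) : Prop := out = string_to_2d_list_alt string rows cols
instance (string : String) (rows : Int) (cols : Int) (out : List (List Int)) : Decidable (Spec_string_to_2d_list string rows cols out) := by unfold Spec_string_to_2d_list; infer_instance

-- ===== CLAIM (what is proved, stated in full; the proofs are below) =====
def Claim_equal_string_to_2d_list : Prop := ∀ (string : String) (rows : Int) (cols : Int), Dom_string_to_2d_list string rows cols → Pre_string_to_2d_list string rows cols → Spec_string_to_2d_list string rows cols (string_to_2d_list string rows cols)

-- ===== LEMMAS AND PROOFS =====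

lemma pv_foldl_set {α : Type} (d : α) (h : Nat → α → α) :
    ∀ (n : Nat) (xs : List α), n ≤ xs.length →
    (List.range n).foldl (fun l i => l.set i (h i (l.getD i d))) xs
      = (List.range n).map (fun i => h i (xs.getD i d)) ++ xs.drop n := by
  intro n
  induction n with
  | zero => simp
  | succ k ih =>
    intro xs hx
    rw [List.range_succ, List.foldl_append, List.map_append, ih xs (by omega)]
    have hk : k < xs.length := by omega
    have hdrop : xs.drop k = xs.getD k d :: xs.drop (k + 1) := by
      rw [List.drop_eq_getElem_cons hk, List.getD_eq_getElem _ _ hk]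
    rw [hdrop]
    simp only [List.foldl_cons, List.foldl_nil, List.map_cons, List.map_nil]
    set pref := (List.range k).map (fun i => h i (xs.getD i d)) with hp
    have hpl : pref.length = k := by simp [hp]
    rw [← hpl]
    simp [List.getD]

lemma pv_drop_take_eq_map {α : Type} (d : α) (L : List α) (a m : Nat) (h : a + m ≤ L.length) :
    (L.drop a).take m = (List.range m).map (fun j => L.getD (a + j) d) := by
  apply List.ext_getElem
  · simp; omega
  · intro j hj1 hj2
    simp only [List.getElem_take, List.getElem_drop, List.getElem_map, List.getElem_range]
    rw [List.getD_eq_getElem _ _ (by simp at hj1; omega)]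

lemma pv_inner_set {α : Type} (d : List α) (i : Nat) (v : Nat → α) :
    ∀ (js : List Nat) (l0 : List (List α)), i < l0.length →
    js.foldl (fun l j => l.set i ((l.getD i d).set j (v j))) l0
      = l0.set i (js.foldl (fun r j => r.set j (v j)) (l0.getD i d)) := by
  intro js
  induction js with
  | nil => intro l0 h; simp only [List.foldl_nil]; rw [List.getD_eq_getElem _ _ h, List.set_getElem_self]
  | cons j rest ih =>
    intro l0 h
    simp only [List.foldl_cons]
    rw [ih _ (by simpa using h)]
    rw [List.set_set, List.getD_eq_getElem _ _ (by simpa using h), List.getElem_set_self,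
        List.getD_eq_getElem _ _ h]

lemma pv_foldl_congr_inv {α β : Type} (P : α → Prop) (f g : α → β → α) :
    ∀ (l : List β) (s : α), P s → (∀ a b, b ∈ l → P a → P (f a b)) →
      (∀ a b, b ∈ l → P a → f a b = g a b) → l.foldl f s = l.foldl g s := by
  intro l
  induction l with
  | nil => intros; rfl
  | cons x t ih =>
    intro s hs hpres heq
    simp only [List.foldl_cons]
    rw [← heq s x (by simp) hs]
    exact ih _ (hpres s x (by simp) hs) (fun a b hb ha => hpres a b (by simp [hb]) ha)
      (fun a b hb ha => heq a b (by simp [hb]) ha)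

theorem main_eq (string : String) (rows cols : Int)
    (hlen : rows * cols = PySem.Str.len string) :
    string_to_2d_list string rows cols = string_to_2d_list_alt string rows cols := by
  unfold string_to_2d_list string_to_2d_list_alt
  rw [if_neg (not_not.mpr hlen), if_neg (not_not.mpr hlen)]
  rw [PySem.Str.len_eq] at hlen
  by_cases hr : 0 ≤ rows
  swap
  · rw [PySem.List.pyRange_one_eq_nil (by omega)]; simp
  by_cases hc : 0 ≤ cols
  swap
  · have hrz : rows = 0 := by nlinarith [Int.natCast_nonneg string.toList.length]
    subst hrz
    rw [PySem.List.pyRange_one_eq_nil (by omega)]; simp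
  lift rows to ℕ using hr with n
  lift cols to ℕ using hc with m
  have hL : string.toList.length = n * m := by exact_mod_cast hlen.symm
  set L := string.toList with hLdef
  set g : Char → Int := fun c => pvIntOfChar (some c) with hg
  set vA : ℕ → ℕ → Int := fun i j => pvIntOfChar L[i * m + j]? with hvA
  simp only [PySem.List.pyRange_zero_nat, List.foldl_map, List.map_map,
    PySem.List.pyRepeat_singleton, Int.toNat_natCast, PySem.List.pySetD_natCast,
    PySem.List.pyGetD_natCast, ← Nat.cast_mul, ← Nat.cast_add, PySem.Str.pyGet?_natCast,
    Function.comp_def]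
  simp only [add_mul, one_mul, ← Nat.cast_mul, PySem.List.slice_natCast_add]
  set init : List (List Int) := (List.range n).map (fun _ => List.replicate m 0) with hinit
  have hinitlen : init.length = n := by simp [hinit]
  have hstep : (List.range n).foldl
        (fun x i => (List.range m).foldl
          (fun x j => x.set i ((x.getD i []).set j (pvIntOfChar string.toList[i * m + j]?))) x) init
      = (List.range n).foldl
        (fun l i => l.set i ((fun (i : ℕ) (r : List Int) =>
            (List.range m).foldl (fun r j => r.set j (vA i j)) r) i (l.getD i []))) init := by
    apply pv_foldl_congr_inv (fun l => l.length = n) _ _ _ _ hinitlen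
    · intro a b hb ha
      rw [pv_inner_set [] b (fun j => pvIntOfChar string.toList[b * m + j]?) (List.range m) a
        (by rw [ha]; simpa using hb)]
      simpa using ha
    · intro a b hb ha
      rw [pv_inner_set [] b (fun j => pvIntOfChar string.toList[b * m + j]?) (List.range m) a
        (by rw [ha]; simpa using hb)]
  rw [hstep, pv_foldl_set ([] : List Int) (fun i r => (List.range m).foldl (fun r j => r.set j (vA i j)) r) n init (by rw [hinitlen])]
  simp only [List.drop_eq_nil_of_le (by omega : init.length ≤ n), List.append_nil]
  apply List.map_congr_left
  intro i hi
  have him : i < n := List.mem_range.mp hi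
  have hgetD : init.getD i [] = List.replicate m 0 := by
    rw [hinit, List.getD_eq_getElem _ _ (by simpa using him)]
    simp
  rw [hgetD]
  have hrow := pv_foldl_set (0 : Int) (fun j _ => vA i j) m (List.replicate m 0) (by simp)
  simp only [] at hrow
  rw [hrow]
  simp only [List.drop_eq_nil_of_le (by simp : (List.replicate m (0:Int)).length ≤ m), List.append_nil]
  rw [pv_drop_take_eq_map (0 : Int) (L.map g) (i * m) m (by simp [hL]; nlinarith)]
  apply List.map_congr_left
  intro j hj
  have hjm : j < m := List.mem_range.mp hj
  have hk : i * m + j < n * m := by nlinarith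
  rw [hvA]
  simp only []
  rw [List.getD_eq_getElem _ _ (by simpa [hL] using hk), List.getElem_map,
    List.getElem?_eq_getElem (by simpa [hL] using hk)]

-- ===== VERDICT (by name: the statement is the Claim_ definition above) =====
theorem string_to_2d_list_spec : Claim_equal_string_to_2d_list := by
  intro string rows cols _ hpre
  exact main_eq string rows cols hpre.1
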